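-- pv_equiv track=rewrite | github.com/somebodnew/OmGTU | lab9.py | distribute_works
-- ===== SOURCE A (Python) =====
-- def distribute_works(works: dict[str, list]) -> list[list]:
--     """
--     works: {'a1': ['b1','b5','b8'], ...}  — механизмы для каждой работы.
--     Возвращает список «шагов» (параллельных слотов), каждый — список работ,
--     выполняемых одновременно (их механизмы не пересекаются).
--     """
--     remaining = dict(works)
--     steps = []
--
--     while remaining:
--         slot = []
--         used_mechanisms = set()
--
--         # сортируем по убыванию кол-ва механизмов (жадный выбор)
--         candidates = sorted(remaining.keys(),
--                             key=lambda w: len(remaining[w]), reverse=True)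
--         for work in candidates:
--             mechs = set(remaining[work])
--             if mechs.isdisjoint(used_mechanisms):
--                 slot.append(work)
--                 used_mechanisms |= mechs
--
--         for w in slot:
--             del remaining[w]
--
--         steps.append(slot)
--
--     return steps
-- ===== SOURCE B (Python) =====
-- def distribute_works(works: dict[str, list]) -> list[list]:
--     """Single-pass first-fit: sort works once by mechanism count (desc) and
--     drop each work into the first slot whose used-mechanism set is disjoint."""
--     order = sorted(works.keys(), key=lambda w: len(works[w]), reverse=True)
--     slots = []  # pairs [slot_works, used_mechanisms]
--     for w in order:
--         mechs = set(works[w])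
--         for slot in slots:
--             if mechs.isdisjoint(slot[1]):
--                 slot[0].append(w)
--                 slot[1] |= mechs
--                 break
--         else:
--             slots.append([[w], set(mechs)])
--     return [s[0] for s in slots]
-- ===== Notes on version B (the rewrite author's own statement) =====
-- stated objective: faster
-- what changed: Instead of repeatedly re-sorting the remaining works and greedily filling one slot per while-round, B sorts the works once by descending mechanism count and places each work with a single first-fit pass into the first slot whose used-mechanism set is disjoint.
import Mathlib
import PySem

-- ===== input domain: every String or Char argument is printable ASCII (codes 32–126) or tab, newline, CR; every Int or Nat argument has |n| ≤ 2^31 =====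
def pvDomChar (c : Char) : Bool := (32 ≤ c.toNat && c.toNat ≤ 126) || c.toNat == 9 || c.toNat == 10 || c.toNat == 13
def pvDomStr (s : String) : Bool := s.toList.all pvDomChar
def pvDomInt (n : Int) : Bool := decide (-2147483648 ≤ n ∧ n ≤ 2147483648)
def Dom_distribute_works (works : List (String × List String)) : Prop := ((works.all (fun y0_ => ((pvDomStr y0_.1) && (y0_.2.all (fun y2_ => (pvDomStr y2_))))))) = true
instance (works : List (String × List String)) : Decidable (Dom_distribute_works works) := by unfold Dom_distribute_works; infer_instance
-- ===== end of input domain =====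

-- B replaces A's re-sort-every-round greedy rounds by ONE descending sort and a single
-- first-fit pass over it (each work goes into the first slot with a disjoint mechanism set).

-- ===== PORT A =====
-- one body of A's inner 'for work in candidates' loop (remaining[work] is always present; getD [] is exact there)
def pvAStep (r : PySem.Dict String (List String)) (p : List String × PySem.Set String) (work : String) : List String × PySem.Set String :=
  let mechs := PySem.Set.ofList (r.getD work [])
  if PySem.Set.isdisjoint mechs p.2 then (p.1 ++ [work], PySem.Set.union p.2 mechs) else p

-- A's 'while remaining' loop; fuel = remaining.size suffices (each round deletes at least one work)
def pvALoop : Nat → PySem.Dict String (List String) → List (List String) → List (List String)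
  | 0, _, steps => steps
  | fuel+1, remaining, steps =>
    if remaining.items.isEmpty then steps else
      let candidates := PySem.List.sorted remaining.keys (fun w => (remaining.getD w []).length) true
      let slot := (candidates.foldl (pvAStep remaining) ([], PySem.Set.empty)).1
      let remaining' := slot.foldl (fun d w => d.erase w) remaining
      pvALoop fuel remaining' (steps ++ [slot])

def distribute_works (works : List (String × List String)) : List (List String) :=
  let remaining := PySem.Dict.ofList works
  pvALoop remaining.size remaining []

-- ===== PORT B =====
-- B's inner 'for slot in slots: … break / else append' — put w into the first slot disjoint from mechs
def pvPlace (w : String) (mechs : PySem.Set String) : List (List String × PySem.Set String) → List (List String × PySem.Set String)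
  | [] => [([w], mechs)]
  | (sl, u) :: rest =>
    if PySem.Set.isdisjoint mechs u then (sl ++ [w], PySem.Set.union u mechs) :: rest
    else (sl, u) :: pvPlace w mechs rest

def distribute_works_alt (works : List (String × List String)) : List (List String) :=
  let d := PySem.Dict.ofList works
  let order := PySem.List.sorted d.keys (fun w => (d.getD w []).length) true
  (order.foldl (fun slots w => pvPlace w (PySem.Set.ofList (d.getD w [])) slots) []).map (fun s => s.1)

-- ===== PRECONDITION & SPEC =====
def Spec_distribute_works (works : List (String × List String)) (out : List (List String)) : Prop := out = distribute_works_alt works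
instance (works : List (String × List String)) (out : List (List String)) : Decidable (Spec_distribute_works works out) := by unfold Spec_distribute_works; infer_instance

-- ===== CLAIM (what is proved, stated in full; the proofs are below) =====
def Claim_equal_distribute_works : Prop := ∀ (works : List (String × List String)), Dom_distribute_works works → Spec_distribute_works works (distribute_works works)

-- ===== LEMMAS AND PROOFS =====

-- the global mechanism-set function both sides are compared through
def pvMs (d : PySem.Dict String (List String)) (w : String) : PySem.Set String :=
  PySem.Set.ofList (d.getD w [])

-- greedy extension of one slot: absorb the disjoint works, return the others in order
def pvGE (ms : String → PySem.Set String) (sl : List String) (u : PySem.Set String) :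
    List String → (List String × PySem.Set String) × List String
  | [] => ((sl, u), [])
  | w :: c =>
    if PySem.Set.isdisjoint (ms w) u then pvGE ms (sl ++ [w]) (PySem.Set.union u (ms w)) c
    else
      let r := pvGE ms sl u c
      (r.1, w :: r.2)

lemma pvGE_fst (ms : String → PySem.Set String) (c : List String) (sl : List String) (u : PySem.Set String) :
    (pvGE ms sl u c).1 = c.foldl (fun p w => if PySem.Set.isdisjoint (ms w) p.2 then (p.1 ++ [w], PySem.Set.union p.2 (ms w)) else p) (sl, u) := by
  induction c generalizing sl u with
  | nil => rfl
  | cons w c ih =>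
    simp only [pvGE, List.foldl_cons]
    by_cases h : PySem.Set.isdisjoint (ms w) u = true
    · simp [h, ih]
    · simp [h, ih]

lemma pvFF_decomp (ms : String → PySem.Set String) (c : List String) (sl : List String) (u : PySem.Set String)
    (tail : List (List String × PySem.Set String)) :
    c.foldl (fun slots w => pvPlace w (ms w) slots) ((sl, u) :: tail)
      = (pvGE ms sl u c).1 :: (pvGE ms sl u c).2.foldl (fun slots w => pvPlace w (ms w) slots) tail := by
  induction c generalizing sl u tail with
  | nil => rfl
  | cons w c ih =>
    simp only [List.foldl_cons, pvGE, pvPlace]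
    by_cases h : PySem.Set.isdisjoint (ms w) u = true
    · simp only [h, if_pos]
      exact ih _ _ _
    · simp only [h, if_neg, Bool.false_eq_true, not_false_iff, List.foldl_cons]
      exact ih _ _ _

lemma pvGE_slot_shape (ms : String → PySem.Set String) (c : List String) (sl : List String) (u : PySem.Set String) :
    ∃ t, (pvGE ms sl u c).1.1 = sl ++ t ∧ ∀ v ∈ t, v ∈ c := by
  induction c generalizing sl u with
  | nil => exact ⟨[], by simp [pvGE]⟩
  | cons w c ih =>
    by_cases h : PySem.Set.isdisjoint (ms w) u = true
    · obtain ⟨t, ht, hm⟩ := ih (sl ++ [w]) (PySem.Set.union u (ms w))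
      refine ⟨w :: t, ?_, ?_⟩
      · simp [pvGE, h, ht]
      · intro v hv
        rcases List.mem_cons.mp hv with rfl | hv
        · simp
        · simp [hm v hv]
    · obtain ⟨t, ht, hm⟩ := ih sl u
      refine ⟨t, ?_, ?_⟩
      · simp [pvGE, h, ht]
      · intro v hv; simp [hm v hv]

lemma pvGE_rest (ms : String → PySem.Set String) (c : List String) (sl : List String) (u : PySem.Set String)
    (hnd : c.Nodup) (hout : ∀ w ∈ c, w ∉ sl) :
    (pvGE ms sl u c).2 = c.filter (fun w => decide (w ∉ (pvGE ms sl u c).1.1)) := by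
  induction c generalizing sl u with
  | nil => rfl
  | cons w c ih =>
    rcases List.nodup_cons.mp hnd with ⟨hw, hc⟩
    by_cases h : PySem.Set.isdisjoint (ms w) u = true
    · have hout' : ∀ v ∈ c, v ∉ sl ++ [w] := by
        intro v hv
        simp only [List.mem_append, List.mem_singleton]
        rintro (hvs | rfl)
        · exact hout v (by simp [hv]) hvs
        · exact hw hv
      have hrec := ih (sl ++ [w]) (PySem.Set.union u (ms w)) hc hout'
      have hmem : w ∈ (pvGE ms (sl ++ [w]) (PySem.Set.union u (ms w)) c).1.1 := by
        obtain ⟨t, ht, _⟩ := pvGE_slot_shape ms c (sl ++ [w]) (PySem.Set.union u (ms w))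
        simp [ht]
      simp only [pvGE, h, if_pos, List.filter_cons]
      simp [hmem, hrec]
    · have hrec := ih sl u hc (fun v hv => hout v (List.mem_cons_of_mem _ hv))
      have hnmem : w ∉ (pvGE ms sl u c).1.1 := by
        obtain ⟨t, ht, hm⟩ := pvGE_slot_shape ms c sl u
        rw [ht]
        simp only [List.mem_append]
        rintro (hvs | hvt)
        · exact hout w (by simp) hvs
        · exact hw (hm w hvt)
      simp only [pvGE, h, List.filter_cons]
      simp [hnmem, hrec]

lemma pvFoldl_erase_items (ws : List String) (r : PySem.Dict String (List String)) :
    (ws.foldl (fun d w => d.erase w) r).items = r.items.filter (fun p => decide (p.1 ∉ ws)) := by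
  induction ws generalizing r with
  | nil => simp
  | cons w ws ih =>
    rw [List.foldl_cons, ih]
    show List.filter _ (List.filter (fun p => !p.1 == w) r.items) = _
    rw [List.filter_filter]
    apply List.filter_congr
    intro p _
    by_cases h1 : p.1 = w <;> by_cases h2 : p.1 ∈ ws <;> simp [h1, h2]

lemma pvIsdisjoint_empty (s : PySem.Set String) : PySem.Set.isdisjoint s PySem.Set.empty = true := by
  simp [PySem.Set.isdisjoint, PySem.Set.empty, PySem.Set.contains]

lemma pvUpdate_append (s : List String) (acc : List String) (hnd : s.Nodup)
    (hfresh : ∀ x ∈ s, x ∉ acc) : PySem.Set.update acc s = acc ++ s := by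
  induction s generalizing acc with
  | nil => simp [PySem.Set.update]
  | cons x s ih =>
    rcases List.nodup_cons.mp hnd with ⟨hx, hs⟩
    have hxacc : x ∉ acc := hfresh x (by simp)
    have hstep : PySem.Set.add acc x = acc ++ [x] := by
      simp [PySem.Set.add, hxacc]
    show PySem.Set.update (PySem.Set.add acc x) s = _
    rw [hstep, ih (acc ++ [x]) hs ?_]
    · simp
    · intro y hy
      simp only [List.mem_append, List.mem_singleton, not_or]
      exact ⟨hfresh y (by simp [hy]), fun hyx => hx (hyx ▸ hy)⟩

lemma pvUnion_empty (s : PySem.Set String) (h : s.Nodup) : PySem.Set.union PySem.Set.empty s = s := by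
  have := pvUpdate_append s [] h (by simp)
  simpa [PySem.Set.union, PySem.Set.empty] using this

lemma pvInsertBy_cons_head {α : Type} (bef : α → α → Bool) (x : α) (acc : List α)
    (h : acc = [] ∨ ∃ y ys, acc = y :: ys ∧ bef x y = true) :
    PySem.List.insertBy bef x acc = x :: acc := by
  rcases h with rfl | ⟨y, ys, rfl, hb⟩
  · rfl
  · simp [PySem.List.insertBy, hb]

lemma pvInsertBy_pairwise {α : Type} (k : α → Nat) (x : α) (acc : List α)
    (h : acc.Pairwise (fun a b => k b ≤ k a)) :
    (PySem.List.insertBy (fun a b => decide (k b < k a)) x acc).Pairwise (fun a b => k b ≤ k a) := by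
  induction acc with
  | nil => simp [PySem.List.insertBy]
  | cons y ys ih =>
    rcases List.pairwise_cons.mp h with ⟨hy, hys⟩
    by_cases hb : k y < k x
    · rw [show PySem.List.insertBy (fun a b => decide (k b < k a)) x (y :: ys) = x :: y :: ys by
        simp [PySem.List.insertBy, hb]]
      refine List.pairwise_cons.mpr ⟨?_, h⟩
      intro z hz
      rcases List.mem_cons.mp hz with rfl | hz
      · omega
      · have := hy z hz; omega
    · rw [show PySem.List.insertBy (fun a b => decide (k b < k a)) x (y :: ys)
          = y :: PySem.List.insertBy (fun a b => decide (k b < k a)) x ys by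
        simp [PySem.List.insertBy, hb]]
      refine List.pairwise_cons.mpr ⟨?_, ih hys⟩
      intro z hz
      rcases (PySem.List.mem_insertBy _ _ _ _).mp hz with rfl | hz
      · omega
      · exact hy z hz

lemma pvFilter_insertBy {α : Type} (k : α → Nat) (p : α → Bool) (x : α) (acc : List α)
    (h : acc.Pairwise (fun a b => k b ≤ k a)) :
    (PySem.List.insertBy (fun a b => decide (k b < k a)) x acc).filter p
      = if p x then PySem.List.insertBy (fun a b => decide (k b < k a)) x (acc.filter p) else acc.filter p := by
  induction acc with
  | nil => by_cases hp : p x <;> simp [PySem.List.insertBy, hp]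
  | cons y ys ih =>
    rcases List.pairwise_cons.mp h with ⟨hy, hys⟩
    by_cases hb : k y < k x
    · -- insertBy = x :: y :: ys
      rw [show PySem.List.insertBy (fun a b => decide (k b < k a)) x (y :: ys) = x :: y :: ys by
        simp [PySem.List.insertBy, hb]]
      by_cases hp : p x
      · rw [if_pos hp]
        rw [pvInsertBy_cons_head]
        · simp [List.filter_cons, hp]
        · -- every kept element z of (y::ys).filter p satisfies k z < k x
          rcases hfc : (y :: ys).filter p with _ | ⟨z, zs⟩
          · exact Or.inl rfl
          · refine Or.inr ⟨z, zs, rfl, ?_⟩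
            have hzmem : z ∈ (y :: ys).filter p := by rw [hfc]; simp
            have hz : z ∈ y :: ys := List.mem_of_mem_filter hzmem
            rcases List.mem_cons.mp hz with rfl | hz
            · simpa using hb
            · have := hy z hz; simp; omega
      · simp [List.filter_cons, hp]
    · rw [show PySem.List.insertBy (fun a b => decide (k b < k a)) x (y :: ys)
          = y :: PySem.List.insertBy (fun a b => decide (k b < k a)) x ys by
        simp [PySem.List.insertBy, hb]]
      by_cases hp : p x
      · rw [if_pos hp]
        by_cases hpy : p y
        · rw [List.filter_cons_of_pos hpy, List.filter_cons_of_pos hpy]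
          rw [show PySem.List.insertBy (fun a b => decide (k b < k a)) x (y :: ys.filter p)
              = y :: PySem.List.insertBy (fun a b => decide (k b < k a)) x (ys.filter p) by
            simp [PySem.List.insertBy, hb]]
          rw [ih hys, if_pos hp]
        · rw [List.filter_cons_of_neg hpy, List.filter_cons_of_neg hpy, ih hys, if_pos hp]
      · rw [if_neg hp]
        by_cases hpy : p y
        · rw [List.filter_cons_of_pos hpy, List.filter_cons_of_pos hpy, ih hys, if_neg hp]
        · rw [List.filter_cons_of_neg hpy, List.filter_cons_of_neg hpy, ih hys, if_neg hp]

lemma pvFoldl_ins_filter {α : Type} (k : α → Nat) (p : α → Bool) (xs : List α) :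
    ∀ acc : List α, acc.Pairwise (fun a b => k b ≤ k a) →
    (xs.foldl (fun acc x => PySem.List.insertBy (fun a b => decide (k b < k a)) x acc) acc).filter p
      = (xs.filter p).foldl (fun acc x => PySem.List.insertBy (fun a b => decide (k b < k a)) x acc) (acc.filter p) := by
  induction xs with
  | nil => intro acc _; rfl
  | cons x xs ih =>
    intro acc hacc
    have hacc' := pvInsertBy_pairwise k x acc hacc
    rw [List.foldl_cons, ih _ hacc', pvFilter_insertBy k p x acc hacc, List.filter_cons]
    by_cases hp : p x <;> simp [hp]

lemma pvSorted_filter {α : Type} (k : α → Nat) (p : α → Bool) (xs : List α) :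
    PySem.List.sorted (xs.filter p) k true = (PySem.List.sorted xs k true).filter p := by
  rw [PySem.List.sorted_rev_eq_foldl_insertBy, PySem.List.sorted_rev_eq_foldl_insertBy,
    pvFoldl_ins_filter k p xs [] (by simp)]
  rfl

lemma pvInsertBy_congr {α : Type} (bef bef' : α → α → Bool) (x : α) (acc : List α)
    (h : ∀ y ∈ acc, bef x y = bef' x y) :
    PySem.List.insertBy bef x acc = PySem.List.insertBy bef' x acc := by
  induction acc with
  | nil => rfl
  | cons y ys ih =>
    have hy : bef x y = bef' x y := h y (by simp)
    by_cases hb : bef x y = true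
    · simp [PySem.List.insertBy, hb, hy ▸ hb]
    · have hb' : bef' x y = false := by rw [← hy]; simpa using hb
      simp only [PySem.List.insertBy, hb, hb']
      simp [ih (fun z hz => h z (by simp [hz]))]

lemma pvSorted_congr {α : Type} (k k' : α → Nat) (xs : List α) (h : ∀ x ∈ xs, k x = k' x) :
    PySem.List.sorted xs k true = PySem.List.sorted xs k' true := by
  rw [PySem.List.sorted_rev_eq_foldl_insertBy, PySem.List.sorted_rev_eq_foldl_insertBy]
  have main : ∀ (l : List α) (acc : List α), (∀ x ∈ l, x ∈ xs) → (∀ x ∈ acc, x ∈ xs) →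
      l.foldl (fun acc x => PySem.List.insertBy (fun a b => decide (k b < k a)) x acc) acc
        = l.foldl (fun acc x => PySem.List.insertBy (fun a b => decide (k' b < k' a)) x acc) acc := by
    intro l
    induction l with
    | nil => intro acc _ _; rfl
    | cons x l ih =>
      intro acc hl hacc
      rw [List.foldl_cons, List.foldl_cons,
        pvInsertBy_congr (fun a b => decide (k b < k a)) (fun a b => decide (k' b < k' a)) x acc
          (by intro y hy; simp only []; rw [h x (hl x (by simp)), h y (hacc y hy)]),
        ih _ (fun z hz => hl z (by simp [hz])) ?_]
      intro z hz
      rcases (PySem.List.mem_insertBy _ _ _ _).mp hz with rfl | hz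
      · exact hl z (by simp)
      · exact hacc z hz
  exact main xs [] (fun x hx => hx) (by simp)

-- keys of a filtered dict are the filtered keys
lemma pvMapFst_filter {α β : Type} (l : List (α × β)) (g : α → Bool) :
    (l.filter (fun p => g p.1)).map Prod.fst = (l.map Prod.fst).filter g := by
  induction l with
  | nil => rfl
  | cons p l ih => by_cases h : g p.1 <;> simp [h, ih]

-- (10) the main loop lemma
lemma pvLoop_eq (d : PySem.Dict String (List String)) :
    ∀ (fuel : Nat) (r : PySem.Dict String (List String)) (steps : List (List String)),
      r.size ≤ fuel → r.keys.Nodup → (∀ w ∈ r.keys, r.getD w [] = d.getD w []) →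
      pvALoop fuel r steps
        = steps ++ ((PySem.List.sorted r.keys (fun w => (d.getD w []).length) true).foldl
            (fun slots w => pvPlace w (pvMs d w) slots) []).map (fun s => s.1) := by
  intro fuel
  induction fuel with
  | zero =>
    intro r steps hsz _ _
    have hitems : r.items = [] := by
      have : r.items.length = 0 := Nat.le_zero.mp hsz
      exact List.length_eq_zero_iff.mp this
    have hkeys : r.keys = [] := by simp [PySem.Dict.keys, hitems]
    simp [pvALoop, hkeys, (PySem.List.sorted_eq_nil_iff ([] : List String) _ true).mpr rfl]
  | succ fuel ih =>
    intro r steps hsz hnd hgetD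
    by_cases hemp : r.items.isEmpty
    · have hitems : r.items = [] := List.isEmpty_iff.mp hemp
      have hkeys : r.keys = [] := by simp [PySem.Dict.keys, hitems]
      simp [pvALoop, hemp, hkeys, (PySem.List.sorted_eq_nil_iff ([] : List String) _ true).mpr rfl]
    · -- round key function agrees with the global one
      have hkeycongr : PySem.List.sorted r.keys (fun w => (r.getD w []).length) true
          = PySem.List.sorted r.keys (fun w => (d.getD w []).length) true :=
        pvSorted_congr _ _ _ (fun w hw => by rw [hgetD w hw])
      -- the candidate list is nonempty
      rcases hc : PySem.List.sorted r.keys (fun w => (d.getD w []).length) true with _ | ⟨w0, c0⟩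
      · exfalso
        have hkeys : r.keys = [] := (PySem.List.sorted_eq_nil_iff _ _ _).mp hc
        have hitems : r.items = [] :=
          List.map_eq_nil_iff.mp (show List.map Prod.fst r.items = [] from hkeys)
        exact hemp (by simp [hitems])
      have hcnd : (w0 :: c0).Nodup := by
        rw [← hc]; exact ((PySem.List.sorted_perm _ _ _).nodup_iff).mpr hnd
      have hw0c0 : w0 ∉ c0 := (List.nodup_cons.mp hcnd).1
      have hc0nd : c0.Nodup := (List.nodup_cons.mp hcnd).2
      have hmemc : ∀ w ∈ w0 :: c0, w ∈ r.keys := by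
        intro w hw; rw [← hc] at hw; exact (PySem.List.mem_sorted _ _ _ _).mp hw
      -- A's inner fold, rewritten through the global mechanism sets
      have hfold : (w0 :: c0).foldl (pvAStep r) ([], PySem.Set.empty)
          = (w0 :: c0).foldl (fun p w => if PySem.Set.isdisjoint (pvMs d w) p.2
              then (p.1 ++ [w], PySem.Set.union p.2 (pvMs d w)) else p) ([], PySem.Set.empty) := by
        apply PySem.List.foldl_congr_mem
        intro acc w hw
        show (let mechs := PySem.Set.ofList (r.getD w []); _) = _
        simp only [pvAStep, pvMs, hgetD w (hmemc w hw)]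
      have hu0 : PySem.Set.union PySem.Set.empty (pvMs d w0) = pvMs d w0 :=
        pvUnion_empty _ (PySem.Set.nodup_ofList _)
      -- name the slot
      have hslotfold : (w0 :: c0).foldl (fun p w => if PySem.Set.isdisjoint (pvMs d w) p.2
              then (p.1 ++ [w], PySem.Set.union p.2 (pvMs d w)) else p) ([], PySem.Set.empty)
          = (pvGE (pvMs d) [w0] (pvMs d w0) c0).1 := by
        rw [List.foldl_cons]
        rw [if_pos (pvIsdisjoint_empty _)]
        simp only [List.nil_append, hu0]
        exact (pvGE_fst (pvMs d) c0 [w0] (pvMs d w0)).symm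
      set ge := pvGE (pvMs d) [w0] (pvMs d w0) c0 with hge
      have hw0slot : w0 ∈ ge.1.1 := by
        obtain ⟨t, ht, _⟩ := pvGE_slot_shape (pvMs d) c0 [w0] (pvMs d w0)
        rw [← hge] at ht; rw [ht]; simp
      -- the next remaining dict
      have hitems' : (ge.1.1.foldl (fun dd w => dd.erase w) r).items
          = r.items.filter (fun p => decide (p.1 ∉ ge.1.1)) := pvFoldl_erase_items _ r
      set r' := ge.1.1.foldl (fun dd w => dd.erase w) r with hr'
      have hkeys' : r'.keys = r.keys.filter (fun w => decide (w ∉ ge.1.1)) := by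
        show r'.items.map Prod.fst
            = List.filter (fun w => decide (w ∉ ge.1.1)) (r.items.map Prod.fst)
        rw [hitems']
        exact pvMapFst_filter r.items (fun a => decide (a ∉ ge.1.1))
      have hnd' : r'.keys.Nodup := by rw [hkeys']; exact hnd.filter _
      have hgetD' : ∀ w ∈ r'.keys, r'.getD w [] = d.getD w [] := by
        intro w hw
        obtain ⟨p, hp, hpw⟩ := List.mem_map.mp hw
        have hpr : p ∈ r.items := by
          have := hp; rw [hitems'] at this; exact List.mem_of_mem_filter this
        have h1 : r'.getD w [] = p.2 := by
          have := PySem.Dict.getD_of_mem_items r' (k := w) (v := p.2) (by rw [← hpw]; exact hp) hnd' []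
          exact this
        have h2 : r.getD w [] = p.2 :=
          PySem.Dict.getD_of_mem_items r (k := w) (v := p.2) (by rw [← hpw]; exact hpr) hnd []
        have hwkeys : w ∈ r.keys := by
          rw [← hpw]; exact List.mem_map_of_mem hpr
        rw [h1, ← hgetD w hwkeys, h2]
      have hsz' : r'.size ≤ fuel := by
        have hw0keys : w0 ∈ r.keys := hmemc w0 (by simp)
        obtain ⟨p, hp, hpw⟩ := List.mem_map.mp hw0keys
        have hlt : (r.items.filter (fun p => decide (p.1 ∉ ge.1.1))).length < r.items.length := by
          apply List.length_filter_lt_length_iff_exists.mpr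
          exact ⟨p, hp, by simp [hpw, hw0slot]⟩
        have : r'.size < r.size := by
          show r'.items.length < r.items.length
          rw [hitems']; exact hlt
        omega
      -- the next round's candidate list is pvGE's fall-through list
      have hrest : PySem.List.sorted r'.keys (fun w => (d.getD w []).length) true = ge.2 := by
        rw [hkeys', pvSorted_filter, hc]
        rw [pvGE_rest (pvMs d) c0 [w0] (pvMs d w0) hc0nd
          (by intro w hw; simp only [List.mem_singleton]; rintro rfl; exact hw0c0 hw)]
        rw [List.filter_cons]
        simp only [hw0slot, not_true_eq_false, decide_false, Bool.false_eq_true, ← hge]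
        rfl
      -- unfold one round of A
      show pvALoop (fuel + 1) r steps = _
      rw [show pvALoop (fuel + 1) r steps
          = pvALoop fuel ((((PySem.List.sorted r.keys (fun w => (r.getD w []).length) true).foldl
              (pvAStep r) ([], PySem.Set.empty)).1).foldl (fun dd w => dd.erase w) r)
            (steps ++ [((PySem.List.sorted r.keys (fun w => (r.getD w []).length) true).foldl
              (pvAStep r) ([], PySem.Set.empty)).1]) by
        simp only [pvALoop, hemp, Bool.false_eq_true, if_neg, not_false_iff]]
      rw [hkeycongr, hc, hfold, hslotfold]
      rw [← hr', ih r' (steps ++ [ge.1.1]) hsz' hnd' hgetD', hrest]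
      -- unfold one first-fit step of B
      rw [List.foldl_cons]
      rw [show pvPlace w0 (pvMs d w0) [] = [([w0], pvMs d w0)] from rfl]
      rw [pvFF_decomp (pvMs d) c0 [w0] (pvMs d w0) []]
      simp [hge]

-- ===== VERDICT (by name: the statement is the Claim_ definition above) =====
theorem distribute_works_spec : Claim_equal_distribute_works := by
  intro works _
  unfold Spec_distribute_works
  show distribute_works works = distribute_works_alt works
  unfold distribute_works distribute_works_alt
  have h := pvLoop_eq (PySem.Dict.ofList works) (PySem.Dict.ofList works).size
    (PySem.Dict.ofList works) [] le_rfl (PySem.Dict.nodup_keys_ofList works) (fun _ _ => rfl)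
  simpa [pvMs] using h
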